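-- pv_equiv track=rewrite | github.com/joonghacho/july_2022 | samsung_april_sw/baekjoon/tetromino.py | shape_1
-- ===== SOURCE A (Python) =====
-- def shape_1(my_map):
--     row = len(my_map)
--     col = len(my_map[0])
--     answer = []
--     for j in range(row):
--         for i in range(col - 3):
--             candi = my_map[j][i] + my_map[j][i+1] + my_map[j][i+2] + my_map[j][i+3]
--             answer.append(candi)
--     return max(answer)
-- ===== SOURCE B (Python) =====
-- def shape_1(my_map):
--     col = len(my_map[0])
--     sums = []
--     for r in my_map:
--         pre = [0]
--         for v in r[:col]:
--             pre.append(pre[-1] + v)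
--         for i in range(col - 3):
--             sums.append(pre[i + 4] - pre[i])
--     return max(sums)
-- ===== Notes on version B (the rewrite author's own statement) =====
-- stated objective: alternative
-- what changed: Replaces the four-term re-summation over a j/i index grid with a per-row prefix-sum table, computing each window as a difference pre[i+4]-pre[i] while iterating the rows directly.
import Mathlib
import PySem

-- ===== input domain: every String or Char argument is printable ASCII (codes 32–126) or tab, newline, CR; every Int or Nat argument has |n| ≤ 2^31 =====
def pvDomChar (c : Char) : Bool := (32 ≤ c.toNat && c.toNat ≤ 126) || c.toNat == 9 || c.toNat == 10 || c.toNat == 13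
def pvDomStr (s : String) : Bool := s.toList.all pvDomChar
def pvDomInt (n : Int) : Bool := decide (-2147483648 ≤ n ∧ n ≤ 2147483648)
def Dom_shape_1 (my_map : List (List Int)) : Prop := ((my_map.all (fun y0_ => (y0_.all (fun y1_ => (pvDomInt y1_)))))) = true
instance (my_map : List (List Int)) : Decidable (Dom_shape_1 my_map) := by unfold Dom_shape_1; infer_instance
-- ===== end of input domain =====

-- B replaces the repeated four-term summation with per-row prefix sums (windows as pre[i+4]-pre[i]); alternative decomposition, same asymptotic cost.


-- ===== PORT A =====
-- my_map[j][i] (defaults only reachable outside Pre_)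
def pvGet2 (m : List (List Int)) (j i : Int) : Int :=
  PySem.List.pyGetD (PySem.List.pyGetD m j []) i 0

def shape_1 (my_map : List (List Int)) : Int :=
  let row : Int := my_map.length
  let col : Int := (PySem.List.pyGetD my_map 0 []).length
  let answer : List Int :=
    (PySem.List.pyRange 0 row 1).foldl (fun acc j =>
      (PySem.List.pyRange 0 (col - 3) 1).foldl (fun acc2 i =>
        acc2 ++ [pvGet2 my_map j i + pvGet2 my_map j (i + 1) +
                 pvGet2 my_map j (i + 2) + pvGet2 my_map j (i + 3)]) acc) []
  (PySem.List.max? answer (fun x => x)).getD 0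

-- ===== PORT B =====
def shape_1_alt (my_map : List (List Int)) : Int :=
  let col : Int := (PySem.List.pyGetD my_map 0 []).length
  let sums : List Int :=
    my_map.foldl (fun acc r =>
      let pre : List Int :=
        (PySem.List.slice r (some 0) (some col)).foldl
          (fun p v => p ++ [PySem.List.pyGetD p (-1) 0 + v]) [0]
      (PySem.List.pyRange 0 (col - 3) 1).foldl (fun acc2 i =>
        acc2 ++ [PySem.List.pyGetD pre (i + 4) 0 - PySem.List.pyGetD pre i 0]) acc) []
  (PySem.List.max? sums (fun x => x)).getD 0

-- ===== PRECONDITION & SPEC =====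
-- Pre_ = exactly where A returns: nonempty map (else IndexError), first row length ≥ 4
-- (else max([]) ValueError), and every row at least as long as the first (else IndexError).
def Pre_shape_1 (my_map : List (List Int)) : Prop :=
  my_map ≠ [] ∧ 4 ≤ (my_map.headD []).length ∧
    ∀ r ∈ my_map, (my_map.headD []).length ≤ r.length
instance (my_map : List (List Int)) : Decidable (Pre_shape_1 my_map) := by
  unfold Pre_shape_1; infer_instance

def pvWitness_shape_1 : List (List Int) := [[1, 2, 3, 4, 5], [5, -1, 0, 2, 7]]

def Spec_shape_1 (my_map : List (List Int)) (out : Int) : Prop := out = shape_1_alt my_map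
instance (my_map : List (List Int)) (out : Int) : Decidable (Spec_shape_1 my_map out) := by
  unfold Spec_shape_1; infer_instance

-- ===== CLAIM (what is proved, stated in full; the proofs are below) =====
def Claim_equal_shape_1 : Prop := ∀ (my_map : List (List Int)), Dom_shape_1 my_map → Pre_shape_1 my_map → Spec_shape_1 my_map (shape_1 my_map)

-- ===== LEMMAS AND PROOFS =====

-- running prefix sums of t starting from accumulated value a (proof-side helper)
def pvPresums (a : Int) : List Int → List Int
  | [] => []
  | v :: t => (a + v) :: pvPresums (a + v) t

theorem pvPresums_foldl (t p : List Int) (hp : p ≠ []) :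
    t.foldl (fun q v => q ++ [PySem.List.pyGetD q (-1) 0 + v]) p
      = p ++ pvPresums (PySem.List.pyGetD p (-1) 0) t := by
  induction t generalizing p with
  | nil => simp [pvPresums]
  | cons v t ih =>
    simp only [List.foldl_cons, pvPresums]
    rw [ih (p ++ [PySem.List.pyGetD p (-1) 0 + v]) (by simp)]
    simp [PySem.List.pyGetD_neg_one_append_singleton]

theorem pvPresums_getD (a : Int) (t : List Int) (k : Nat) (hk : k < t.length) :
    (pvPresums a t).getD k 0 = a + (t.take (k + 1)).sum := by
  induction t generalizing a k with
  | nil => simp at hk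
  | cons v t ih =>
    cases k with
    | zero => simp [pvPresums]
    | succ k =>
      simp only [pvPresums, List.getD_cons_succ, List.take_succ_cons, List.sum_cons]
      rw [ih (a + v) k (by simpa using hk)]
      ring

theorem pvPre_getD (t : List Int) (k : Nat) (hk : k ≤ t.length) :
    PySem.List.pyGetD ([0] ++ pvPresums 0 t) (k : Int) 0 = (t.take k).sum := by
  rw [PySem.List.pyGetD_natCast]
  cases k with
  | zero => simp
  | succ k =>
    simp only [List.cons_append, List.nil_append, List.getD_cons_succ]
    rw [pvPresums_getD 0 t k (by omega)]
    ring

theorem pvSum_take_succ (t : List Int) (k : Nat) (h : k < t.length) :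
    (t.take (k + 1)).sum = (t.take k).sum + t.getD k 0 := by
  rw [List.take_add_one, List.getElem?_eq_getElem h, List.sum_append,
    List.getD_eq_getElem?_getD, List.getElem?_eq_getElem h]; simp

theorem shape_1_spec : Claim_equal_shape_1 := by
  intro m _ hpre
  obtain ⟨hne, h4, hrows⟩ := hpre
  have hhead : PySem.List.pyGetD m 0 [] = m.headD [] := by
    cases m with
    | nil => exact absurd rfl hne
    | cons h t => simp [PySem.List.pyGetD_zero]
  unfold Spec_shape_1 shape_1 shape_1_alt
  simp only [pvGet2, PySem.List.foldl_append_singleton_eq_map,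
    PySem.List.foldl_append_eq_flatMap, List.nil_append]
  refine congrArg (fun L => (PySem.List.max? L (fun x => x)).getD 0) ?_
  rw [List.flatMap_def, List.flatMap_def]
  refine congrArg List.flatten ?_
  set cN := (PySem.List.pyGetD m 0 []).length with hcN
  conv_rhs => rw [← PySem.List.map_pyGetD_pyRange_zero' m ([] : List Int), List.map_map]
  refine List.map_congr_left ?_
  intro j hj
  rw [PySem.List.mem_pyRange_one] at hj
  simp only [Function.comp]
  set r := PySem.List.pyGetD m j [] with hr
  have hrmem : r ∈ m := PySem.List.pyGetD_mem (xs := m) (i := j) (d := [])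
    (by simp [PySem.Raise.InRange]; omega)
  have hcol : cN ≤ r.length := by rw [hcN, hhead]; exact hrows r hrmem
  set t := r.take cN with ht
  have htlen : t.length = cN := by rw [ht, List.length_take]; omega
  have hslice : PySem.List.slice r (some 0) (some (cN : Int)) = t := by
    rw [PySem.List.slice_zero_start, PySem.List.slice_to_natCast]
  have hpre : (PySem.List.slice r (some 0) (some (cN : Int))).foldl
      (fun p v => p ++ [PySem.List.pyGetD p (-1) 0 + v]) [0]
      = [0] ++ pvPresums 0 t := by
    rw [hslice, pvPresums_foldl t [0] (by simp)]
    have h0 : PySem.List.pyGetD ([0] : List Int) (-1) 0 = 0 := by decide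
    rw [h0]
  rw [hpre]
  refine List.map_congr_left ?_
  intro i hi
  rw [PySem.List.mem_pyRange_one] at hi
  obtain ⟨hi0, hiu⟩ := hi
  set k := i.toNat with hk
  have hik : i = (k : Int) := by omega
  have h1 : i + 4 = ((k + 4 : Nat) : Int) := by omega
  have hget : ∀ jx : Nat, jx < cN →
      PySem.List.pyGetD r (jx : Int) 0 = t.getD jx 0 := by
    intro jx hjlt
    rw [PySem.List.pyGetD_natCast, ht, List.getD_eq_getElem?_getD,
      List.getD_eq_getElem?_getD, List.getElem?_take_of_lt hjlt]
  rw [h1, hik, pvPre_getD t (k + 4) (by omega), pvPre_getD t k (by omega)]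
  have e1 : ((k : Int) + 1) = ((k + 1 : Nat) : Int) := by push_cast; ring
  have e2 : ((k : Int) + 2) = ((k + 2 : Nat) : Int) := by push_cast; ring
  have e3 : ((k : Int) + 3) = ((k + 3 : Nat) : Int) := by push_cast; ring
  rw [e1, e2, e3, hget k (by omega), hget (k + 1) (by omega), hget (k + 2) (by omega),
      hget (k + 3) (by omega)]
  rw [pvSum_take_succ t (k + 3) (by omega), pvSum_take_succ t (k + 2) (by omega),
      pvSum_take_succ t (k + 1) (by omega), pvSum_take_succ t k (by omega)]
  ring
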